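-- pv_equiv track=rewrite | github.com/KnightDurpy/KnightDurpy | proj02-short/indentation_print.py | space_counter
-- ===== SOURCE A (Python) =====
-- def space_counter(line):
--     counter = 0
--     for space in range(0, len(line)):
--         if line[space] == ' ':
--             counter += 1
--         if line[space].isalpha():
--             break
--     return counter
-- ===== SOURCE B (Python) =====
-- def space_counter(line):
--     idx = next((i for i, c in enumerate(line) if c.isalpha()), len(line))
--     return line[:idx].count(' ')
-- ===== Notes on version B (the rewrite author's own statement) =====
-- stated objective: idiomatic
-- what changed: Replaced the single interleaved count-and-break index loop by a find-then-count decomposition: first locate the index of the first alphabetic character, then count spaces in the prefix before it.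
import Mathlib
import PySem

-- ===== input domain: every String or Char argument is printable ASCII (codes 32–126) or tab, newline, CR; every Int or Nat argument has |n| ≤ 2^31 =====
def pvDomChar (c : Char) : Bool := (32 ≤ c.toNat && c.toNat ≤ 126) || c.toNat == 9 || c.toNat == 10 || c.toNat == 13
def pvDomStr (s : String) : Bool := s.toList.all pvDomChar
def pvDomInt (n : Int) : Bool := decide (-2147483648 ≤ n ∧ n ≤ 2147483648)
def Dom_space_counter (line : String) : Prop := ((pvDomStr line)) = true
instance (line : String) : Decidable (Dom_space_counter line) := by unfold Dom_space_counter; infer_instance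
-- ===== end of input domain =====

-- B replaces A's interleaved count-and-break loop by a find-first-alpha-then-count-prefix decomposition (same cost).


-- ===== PORT A =====
-- A scans the characters in index order, incrementing on ' ' and breaking after the first
-- alphabetic character; the index loop with break is rendered as structural recursion over toList.
def spaceCounterLoop : List Char → Int → Int
  | [], counter => counter
  | c :: rest, counter =>
    let counter' := if c = ' ' then counter + 1 else counter
    if c.isAlpha then counter' else spaceCounterLoop rest counter'

def space_counter (line : String) : Int :=
  spaceCounterLoop line.toList 0

-- ===== PORT B =====
-- B: index of the first alphabetic character (fallback: length), then count spaces in that prefix.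
def firstAlphaIdx : List Char → Nat
  | [] => 0
  | c :: rest => if c.isAlpha then 0 else 1 + firstAlphaIdx rest

def space_counter_alt (line : String) : Int :=
  ((line.toList.take (firstAlphaIdx line.toList)).count ' ' : Int)

-- ===== PRECONDITION & SPEC =====
def Spec_space_counter (line : String) (out : Int) : Prop := out = space_counter_alt line
instance (line : String) (out : Int) : Decidable (Spec_space_counter line out) := by unfold Spec_space_counter; infer_instance

-- ===== CLAIM (what is proved, stated in full; the proofs are below) =====
def Claim_equal_space_counter : Prop := ∀ (line : String), Dom_space_counter line → Spec_space_counter line (space_counter line)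

-- ===== LEMMAS AND PROOFS =====
theorem spaceCounterLoop_eq (l : List Char) :
    ∀ counter : Int, spaceCounterLoop l counter = counter + ((l.take (firstAlphaIdx l)).count ' ' : Int) := by
  induction l with
  | nil => intro c; simp [spaceCounterLoop, firstAlphaIdx]
  | cons ch rest ih =>
    intro c
    by_cases ha : ch.isAlpha
    · have hne : ch ≠ ' ' := by
        intro h; subst h; simp at ha
      simp [spaceCounterLoop, firstAlphaIdx, ha, hne]
    · simp only [spaceCounterLoop, firstAlphaIdx, if_neg ha]
      rw [ih]
      have : (1 + firstAlphaIdx rest) = Nat.succ (firstAlphaIdx rest) := by omega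
      rw [this]
      by_cases hs : ch = ' '
      · simp [hs, List.count_cons]
        push_cast
        ring
      · simp [hs, List.take_succ_cons, List.count_cons]

-- ===== VERDICT (by name: the statement is the Claim_ definition above) =====
theorem space_counter_spec : Claim_equal_space_counter := by
  intro line _
  unfold Spec_space_counter space_counter space_counter_alt
  rw [spaceCounterLoop_eq]
  simp
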